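-- pv_equiv track=rewrite | github.com/logflux/logflux | src/logflux/iplom.py | extract_tpl
-- ===== SOURCE A (Python) =====
-- def extract_tpl(tok_logs):
--     if len(tok_logs)==1:
--         return tuple(tok_logs[0])
--     else:
--         #partition logs are of same size
--         loglen = len(tok_logs[0])
--         pos2col = [set() for i in range(loglen)]
--
--         for tok_log in tok_logs:
--             for i, token in enumerate(tok_log):
--                 pos2col[i].add(token)
--
--         tpl=[]
--         for col in pos2col:
--             if len(col) == 1:
--                 tpl.append(list(col)[0])
--             else:
--                 tpl.append(None)
--
--         return tuple(tpl)
-- ===== SOURCE B (Python) =====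
-- def extract_tpl(tok_logs):
--     template = list(tok_logs[0])
--     varies = [False] * len(template)
--     for log in tok_logs[1:]:
--         for i, token in enumerate(log):
--             if token != template[i]:
--                 varies[i] = True
--     return tuple(None if v else t for t, v in zip(template, varies))
-- ===== Notes on version B (the rewrite author's own statement) =====
-- stated objective: simpler
-- what changed: Replaces the per-position set-of-tokens list (built, then re-scanned for singleton sets) by a single pass keeping the first log as template plus a boolean 'varies' flag per position; also removes the special single-log branch.
import Mathlib
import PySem

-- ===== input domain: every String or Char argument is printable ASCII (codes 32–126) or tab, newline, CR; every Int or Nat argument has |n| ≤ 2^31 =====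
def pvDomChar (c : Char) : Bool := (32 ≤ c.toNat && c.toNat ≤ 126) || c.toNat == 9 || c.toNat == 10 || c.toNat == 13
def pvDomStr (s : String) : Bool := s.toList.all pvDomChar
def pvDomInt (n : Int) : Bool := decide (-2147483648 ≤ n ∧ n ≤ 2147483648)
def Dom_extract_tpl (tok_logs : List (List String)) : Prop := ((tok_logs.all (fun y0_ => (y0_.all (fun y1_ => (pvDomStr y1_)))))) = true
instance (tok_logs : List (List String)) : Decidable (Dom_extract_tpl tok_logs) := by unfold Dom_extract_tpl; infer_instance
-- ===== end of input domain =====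

-- B keeps the first log as the template plus a per-position 'varies' flag in one pass,
-- instead of A's list of per-position token sets re-scanned for singletons (objective: simpler).


-- ===== PORT A =====
-- 'for i, token in enumerate(tok_log): pos2col[i].add(token)' — positions are consecutive
-- from 0, so the in-place update at index i is walking pos2col in step with tok_log.
-- A log longer than pos2col raises IndexError in Python (excluded by Pre_); here [].
def pvAddLog : List (PySem.Set String) → List String → List (PySem.Set String)
  | cols, [] => cols
  | [], _ :: _ => []
  | c :: cs, t :: ts => PySem.Set.add c t :: pvAddLog cs ts

def extract_tpl (tok_logs : List (List String)) : List (Option String) :=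
  if tok_logs.length = 1 then (tok_logs.headD []).map some
  else
    let loglen := (tok_logs.headD []).length
    let pos2col := tok_logs.foldl pvAddLog
        (List.replicate loglen (PySem.Set.ofList ([] : List String)))
    -- len(col)==1: the set is a singleton, so list(col)[0] is its unique element
    -- (hash iteration order is irrelevant for a singleton).
    pos2col.map (fun col => if PySem.Set.len col = 1 then some (col.headD "") else none)

-- ===== PORT B =====
-- inner loop of Source B: for i, token in enumerate(log): if token != template[i]: varies[i] = True
-- (consecutive positions: walk template/varies in step with log; template[i] out of
-- range raises in Python — excluded by Pre_; here the tail is left unchanged).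
def pvMark : List String → List Bool → List String → List Bool
  | tp :: tps, v :: vs, t :: ts => (if t ≠ tp then true else v) :: pvMark tps vs ts
  | _, vs, _ => vs

def extract_tpl_alt (tok_logs : List (List String)) : List (Option String) :=
  match tok_logs with
  | [] => []   -- tok_logs[0] raises IndexError in Python; excluded by Pre_
  | first :: rest =>
    let varies := rest.foldl (fun vs log => pvMark first vs log)
        (List.replicate first.length false)
    (first.zip varies).map (fun tv => if tv.2 then none else some tv.1)

-- ===== PRECONDITION & SPEC =====
-- A raises IndexError iff tok_logs is empty or some log is longer than the first;
-- Pre_ excludes exactly those inputs (B raises on exactly the same ones).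
def Pre_extract_tpl (tok_logs : List (List String)) : Prop :=
  tok_logs ≠ [] ∧ ∀ l ∈ tok_logs, l.length ≤ (tok_logs.headD []).length
instance (tok_logs : List (List String)) : Decidable (Pre_extract_tpl tok_logs) := by
  unfold Pre_extract_tpl; infer_instance

def pvWitness_extract_tpl : List (List String) :=
  [["a", "x", "c"], ["a", "y", "c"], ["a", "x"]]

def Spec_extract_tpl (tok_logs : List (List String)) (out : List (Option String)) : Prop :=
  out = extract_tpl_alt tok_logs
instance (tok_logs : List (List String)) (out : List (Option String)) :
    Decidable (Spec_extract_tpl tok_logs out) := by unfold Spec_extract_tpl; infer_instance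

-- ===== CLAIM (what is proved, stated in full; the proofs are below) =====
def Claim_equal_extract_tpl : Prop := ∀ (tok_logs : List (List String)),
  Dom_extract_tpl tok_logs → Pre_extract_tpl tok_logs →
  Spec_extract_tpl tok_logs (extract_tpl tok_logs)

-- ===== LEMMAS AND PROOFS =====

-- Per-column invariant relating A's set and B's (template value, varies flag):
-- the set's first (insertion-order) element is the template token, and the flag is
-- false exactly when the set is still the singleton of that token.
def pvInv (c : PySem.Set String) (tp : String) (v : Bool) : Prop :=
  if v then 2 ≤ c.length ∧ c.head? = some tp else c = [tp]

-- Pointwise invariant between a column list and the (template, varies) pair.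
def pvInvL : List (PySem.Set String) → List String → List Bool → Prop
  | [], [], [] => True
  | c :: cs, tp :: tps, v :: vs => pvInv c tp v ∧ pvInvL cs tps vs
  | _, _, _ => False

theorem pvInv_add (c : PySem.Set String) (tp t : String) (v : Bool)
    (h : pvInv c tp v) : pvInv (PySem.Set.add c t) tp (if t ≠ tp then true else v) := by
  unfold pvInv at h ⊢
  cases hv : v with
  | true =>
    simp only [hv, if_true] at h
    have hlen : 2 ≤ (PySem.Set.add c t).length := by
      unfold PySem.Set.add
      split
      · exact h.1
      · simpa using Nat.le_succ_of_le h.1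
    have hhead : (PySem.Set.add c t).head? = some tp := by
      unfold PySem.Set.add
      split
      · exact h.2
      · rcases c with _ | ⟨x, xs⟩
        · simp at h
        · simpa using h.2
    split <;> simp [hlen, hhead]
  | false =>
    simp only [hv] at h
    subst h
    by_cases ht : t = tp
    · subst ht
      simp [PySem.Set.add, PySem.Set.contains]
    · simp [PySem.Set.add, PySem.Set.contains, ht]

theorem pvInvL_step (cols : List (PySem.Set String)) (tpl : List String)
    (vs : List Bool) (log : List String)
    (hlen : log.length ≤ tpl.length)
    (h : pvInvL cols tpl vs) :
    pvInvL (pvAddLog cols log) tpl (pvMark tpl vs log) := by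
  induction log generalizing cols tpl vs with
  | nil => cases cols with
    | nil => cases tpl <;> cases vs <;> simpa [pvAddLog, pvMark] using h
    | cons c cs => cases tpl <;> cases vs <;> simpa [pvAddLog, pvMark] using h
  | cons t ts ih =>
    cases cols with
    | nil => cases tpl with
      | nil => simp at hlen
      | cons tp tps => cases vs <;> simp [pvInvL] at h
    | cons c cs =>
      cases tpl with
      | nil => simp at hlen
      | cons tp tps =>
        cases vs with
        | nil => simp [pvInvL] at h
        | cons v vs' =>
          obtain ⟨h1, h2⟩ := h
          refine ⟨pvInv_add c tp t v h1, ?_⟩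
          exact ih cs tps vs' (by simpa using hlen) h2

-- the fold over the remaining logs preserves the invariant
theorem pvInvL_fold (rest : List (List String)) (tpl : List String)
    (cols : List (PySem.Set String)) (vs : List Bool)
    (hlen : ∀ l ∈ rest, l.length ≤ tpl.length)
    (h : pvInvL cols tpl vs) :
    pvInvL (rest.foldl pvAddLog cols) tpl
      (rest.foldl (fun vs log => pvMark tpl vs log) vs) := by
  induction rest generalizing cols vs with
  | nil => simpa using h
  | cons l ls ih =>
    simp only [List.foldl_cons]
    exact ih _ _ (fun x hx => hlen x (by simp [hx]))
      (pvInvL_step cols tpl vs l (hlen l (by simp)) h)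

-- processing the first log against all-empty sets yields singletons paired with 'false' flags
theorem pvInvL_init (first : List String) :
    pvInvL (pvAddLog (List.replicate first.length (PySem.Set.ofList ([] : List String))) first)
      first (List.replicate first.length false) := by
  induction first with
  | nil => simp [pvAddLog, pvInvL]
  | cons t ts ih =>
    refine ⟨?_, ih⟩
    simp [pvInv, PySem.Set.ofList, PySem.Set.add, PySem.Set.contains]

-- the final read-out of both programs agree under the invariant
theorem pvReadout (cols : List (PySem.Set String)) (tpl : List String) (vs : List Bool)
    (h : pvInvL cols tpl vs) :
    cols.map (fun col => if PySem.Set.len col = 1 then some (col.headD "") else none)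
      = (tpl.zip vs).map (fun tv => if tv.2 then none else some tv.1) := by
  induction cols generalizing tpl vs with
  | nil => cases tpl <;> cases vs <;> simp_all [pvInvL]
  | cons c cs ih =>
    cases tpl with
    | nil => cases vs <;> simp [pvInvL] at h
    | cons tp tps =>
      cases vs with
      | nil => simp [pvInvL] at h
      | cons v vs' =>
        obtain ⟨h1, h2⟩ := h
        simp only [List.zip_cons_cons, List.map_cons]
        refine congrArg₂ _ ?_ (ih tps vs' h2)
        unfold pvInv at h1
        by_cases hv : v
        · simp only [hv, if_true] at h1
          have hne : ¬ List.length c = 1 := by omega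
          simp [hv, PySem.Set.len, hne]
        · simp only [hv] at h1
          subst h1
          simp [hv, PySem.Set.len]

-- for a single log (A's special branch and B with empty rest) both give first.map some
theorem pvSingle (first : List String) :
    (first.zip (List.replicate first.length false)).map
        (fun tv => if tv.2 then none else some tv.1) = first.map some := by
  induction first with
  | nil => simp
  | cons t ts ih => simpa [List.replicate_succ] using ih

-- ===== VERDICT (by name: the statement is the Claim_ definition above) =====
theorem extract_tpl_spec : Claim_equal_extract_tpl := by
  intro tok_logs _ hpre
  obtain ⟨hne, hlen⟩ := hpre
  cases tok_logs with
  | nil => exact absurd rfl hne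
  | cons first rest =>
    show extract_tpl (first :: rest) = extract_tpl_alt (first :: rest)
    unfold extract_tpl extract_tpl_alt
    simp only [List.headD_cons] at hlen ⊢
    by_cases h1 : (first :: rest).length = 1
    · have hrest : rest = [] := by
        cases rest with
        | nil => rfl
        | cons a b => simp at h1
      subst hrest
      simp [h1, pvSingle]
    · simp only [h1, if_false, List.foldl_cons]
      have hinit := pvInvL_init first
      have hfold := pvInvL_fold rest first _ _ (fun l hl => hlen l (List.mem_cons_of_mem _ hl)) hinit
      exact pvReadout _ _ _ hfold
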